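-- pv_equiv track=rewrite | github.com/shakfu/py2max | py2max/layout.py | _infer_column_from_context
-- ===== SOURCE A (Python) =====
-- def _infer_column_from_context(obj, object_name: str) -> int:
--     """Infer category assignment from object name patterns and context.
--
--     Args:
--         obj: The Box object.
--         object_name: The object's name/type.
--
--     Returns:
--         Category index (0-3) for the object.
--     """
--     # Check specific patterns first (regardless of ~ suffix)
--
--     # Output-like patterns (check first because they can end with ~)
--     if any(out_word in object_name.lower() for out_word in
--            ['out', 'dac', 'record', 'write', 'send', 'print', 'meter']):
--         return 3  # Outputs
--
--     # Input-like patterns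
--     if any(input_word in object_name.lower() for input_word in
--            ['adc', 'in', 'inlet', 'receive', 'midiin', 'notein', 'ctlin', 'bendin', 'pgmin', 'touchin']):
--         return 0  # Inputs/Controls
--
--     # UI/control-like patterns
--     if any(ctrl_word in object_name.lower() for ctrl_word in
--            ['button', 'slider', 'dial', 'knob', 'fader', 'param']):
--         return 0  # Controls
--
--     # Audio objects (end with ~) are likely processors unless clearly generators
--     if object_name.endswith('~'):
--         # Look for generator patterns
--         if any(gen_word in object_name.lower() for gen_word in
--                ['osc', 'cycle', 'saw', 'noise', 'play', 'sample']):
--             return 1  # Generators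
--         else:
--             return 2  # Processors (default for audio objects)
--
--     # Default to processors category for unknown objects
--     return 2
-- ===== SOURCE B (Python) =====
-- _OUT = ['out', 'dac', 'record', 'write', 'send', 'print', 'meter']
-- _IN = ['adc', 'in', 'inlet', 'receive', 'midiin', 'notein', 'ctlin', 'bendin', 'pgmin', 'touchin']
-- _CTRL = ['button', 'slider', 'dial', 'knob', 'fader', 'param']
-- _GEN = ['osc', 'cycle', 'saw', 'noise', 'play', 'sample']
--
-- # Flat keyword table: (word, priority, category).  Instead of ordered
-- # early-return checks, we score every matching keyword and keep the best
-- # (lowest-priority) candidate seen, starting from the default (4, 2).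
-- _KEYWORDS = (
--     [(w, 0, 3) for w in _OUT]
--     + [(w, 1, 0) for w in _IN]
--     + [(w, 2, 0) for w in _CTRL]
-- )
--
--
-- def _infer_column_from_context(obj, object_name: str) -> int:
--     name = object_name.lower()
--     best = (4, 2)  # default: processors
--     for w, p, c in _KEYWORDS:
--         if w in name and (p, c) < best:
--             best = (p, c)
--     if object_name.endswith('~'):
--         for g in _GEN:
--             if g in name and (3, 1) < best:
--                 best = (3, 1)
--     return best[1]
-- ===== Notes on version B (the rewrite author's own statement) =====
-- stated objective: alternative
-- what changed: Replaces the ordered early-return if-chain with a best-candidate scan over a flat (word, priority, category) keyword table: every matching keyword is scored and the lexicographically smallest (priority, category) wins, starting from the default (4, 2).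
import Mathlib
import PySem

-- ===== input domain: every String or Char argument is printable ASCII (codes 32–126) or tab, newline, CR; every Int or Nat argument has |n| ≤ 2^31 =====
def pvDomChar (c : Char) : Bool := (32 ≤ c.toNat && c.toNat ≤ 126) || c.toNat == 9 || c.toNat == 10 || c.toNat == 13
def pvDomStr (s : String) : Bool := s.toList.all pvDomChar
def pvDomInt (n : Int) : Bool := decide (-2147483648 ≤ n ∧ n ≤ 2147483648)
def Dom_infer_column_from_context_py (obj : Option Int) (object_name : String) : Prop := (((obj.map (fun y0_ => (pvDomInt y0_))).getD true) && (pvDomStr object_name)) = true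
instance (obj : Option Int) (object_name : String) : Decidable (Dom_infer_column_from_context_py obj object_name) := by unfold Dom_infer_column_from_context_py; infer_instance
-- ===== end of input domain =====

-- B replaces A's ordered early-return if-chain by a best-candidate scan: every keyword
-- carries a (priority, category) score and B keeps the lexicographically smallest
-- matching score, starting from the default (alternative decomposition; same cost).

-- word lists shared by both ports (A's literal lists, named once)
def pvOutWords : List String := ["out", "dac", "record", "write", "send", "print", "meter"]
def pvInWords : List String := ["adc", "in", "inlet", "receive", "midiin", "notein", "ctlin", "bendin", "pgmin", "touchin"]
def pvCtrlWords : List String := ["button", "slider", "dial", "knob", "fader", "param"]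
def pvGenWords : List String := ["osc", "cycle", "saw", "noise", "play", "sample"]

-- ===== PORT A =====
def infer_column_from_context_py (obj : Option Int) (object_name : String) : Int :=
  if pvOutWords.any (fun w => PySem.Str.isIn w (PySem.Str.lower object_name)) then 3
  else if pvInWords.any (fun w => PySem.Str.isIn w (PySem.Str.lower object_name)) then 0
  else if pvCtrlWords.any (fun w => PySem.Str.isIn w (PySem.Str.lower object_name)) then 0
  else if PySem.Str.endswith object_name "~" then
    if pvGenWords.any (fun w => PySem.Str.isIn w (PySem.Str.lower object_name)) then 1
    else 2
  else 2

-- ===== PORT B =====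
-- Python tuple '<' on (int, int)
def pvLexLt (a b : Int × Int) : Bool := a.1 < b.1 || (a.1 == b.1 && a.2 < b.2)

-- the flat keyword table _KEYWORDS : (word, priority, category)
def pvKeywords : List (String × Int × Int) :=
  pvOutWords.map (fun w => (w, (0 : Int), (3 : Int)))
  ++ pvInWords.map (fun w => (w, (1 : Int), (0 : Int)))
  ++ pvCtrlWords.map (fun w => (w, (2 : Int), (0 : Int)))

def infer_column_from_context_py_alt (obj : Option Int) (object_name : String) : Int :=
  let name := PySem.Str.lower object_name
  let best : Int × Int := (4, 2)  -- default: processors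
  let best := pvKeywords.foldl
    (fun b wpc => if PySem.Str.isIn wpc.1 name && pvLexLt wpc.2 b then wpc.2 else b) best
  let best := if PySem.Str.endswith object_name "~" then
      pvGenWords.foldl
        (fun b g => if PySem.Str.isIn g name && pvLexLt (3, 1) b then ((3 : Int), (1 : Int)) else b) best
    else best
  best.2

-- ===== PRECONDITION & SPEC =====
def Spec_infer_column_from_context_py (obj : Option Int) (object_name : String) (out : Int) : Prop := out = infer_column_from_context_py_alt obj object_name
instance (obj : Option Int) (object_name : String) (out : Int) : Decidable (Spec_infer_column_from_context_py obj object_name out) := by unfold Spec_infer_column_from_context_py; infer_instance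

-- ===== CLAIM =====
def Claim_equal_infer_column_from_context_py : Prop := ∀ (obj : Option Int) (object_name : String), Dom_infer_column_from_context_py obj object_name → Spec_infer_column_from_context_py obj object_name (infer_column_from_context_py obj object_name)

-- ===== LEMMAS AND PROOFS =====

-- installing the same score twice is the same as installing it once
theorem pv_step_idem (pc x : Int × Int) :
    (if pvLexLt pc (if pvLexLt pc x then pc else x) then pc else if pvLexLt pc x then pc else x)
      = if pvLexLt pc x then pc else x := by
  by_cases hx : pvLexLt pc x = true
  · rw [if_pos hx]
    simp
  · rw [if_neg hx, if_neg hx]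

-- one keyword group with constant score pc: the scan either installs pc once or leaves b
theorem pv_scan_words (n : String) (pc : Int × Int) (ws : List String) (b : Int × Int) :
    ws.foldl (fun b w => if PySem.Str.isIn w n && pvLexLt pc b then pc else b) b
      = if ws.any (fun w => PySem.Str.isIn w n) then (if pvLexLt pc b then pc else b) else b := by
  induction ws generalizing b with
  | nil => simp
  | cons w ws ih =>
    rw [List.foldl_cons, List.any_cons, ih]
    by_cases h : PySem.Str.isIn w n = true
    · rw [h]
      simp only [Bool.true_and, Bool.true_or, if_true]
      cases hws : ws.any (fun w => PySem.Str.isIn w n)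
      · simp only [Bool.false_eq_true, if_false]
      · simp only [if_true, pv_step_idem]
    · rw [Bool.not_eq_true] at h
      rw [h]
      simp only [Bool.false_and, Bool.false_or, Bool.false_eq_true, if_false]

theorem infer_eq (obj : Option Int) (object_name : String) :
    infer_column_from_context_py obj object_name = infer_column_from_context_py_alt obj object_name := by
  unfold infer_column_from_context_py infer_column_from_context_py_alt pvKeywords
  simp only [List.foldl_append, List.foldl_map, pv_scan_words]
  cases h0 : pvOutWords.any (fun w => PySem.Str.isIn w (PySem.Str.lower object_name)) <;>
    cases h1 : pvInWords.any (fun w => PySem.Str.isIn w (PySem.Str.lower object_name)) <;>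
      cases h2 : pvCtrlWords.any (fun w => PySem.Str.isIn w (PySem.Str.lower object_name)) <;>
        cases ht : PySem.Str.endswith object_name "~" <;>
          cases hg : pvGenWords.any (fun w => PySem.Str.isIn w (PySem.Str.lower object_name)) <;>
            simp only [Bool.false_eq_true, if_false, if_true] <;> norm_num [pvLexLt]

-- ===== VERDICT =====
theorem infer_column_from_context_py_spec : Claim_equal_infer_column_from_context_py := by
  intro obj object_name _
  exact infer_eq obj object_name
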